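-- pv_equiv track=rewrite | github.com/clemencegoh/Python_Algorithms | algorithms/Daily_Interview/connected_groups.py | solution
-- ===== SOURCE A (Python) =====
-- def solution(arr: []):
--     num_groups = 0
--     seen = set()
--     for tup in arr:
--         both_unseen = True
--         for num in tup:
--             if num in seen:
--                 both_unseen = False
--             else:
--                 seen.add(num)
--         if both_unseen:
--             num_groups += 1
--     return num_groups
-- ===== SOURCE B (Python) =====
-- def solution(arr: []):
--     # Two staged passes: first-occurrence index of each value in the flattened
--     # stream, then count tuples whose two slots are both first occurrences.
--     first = {}
--     for i, (a, b) in enumerate(arr):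
--         first.setdefault(a, 2 * i)
--         first.setdefault(b, 2 * i + 1)
--     num_groups = 0
--     for i, (a, b) in enumerate(arr):
--         if first[a] == 2 * i and first[b] == 2 * i + 1:
--             num_groups += 1
--     return num_groups
-- ===== Notes on version B (the rewrite author's own statement) =====
-- stated objective: alternative
-- what changed: Replaces A's single pass with a mutable seen-set and per-tuple flag by two staged passes: first a dict mapping each value to its first-occurrence index in the flattened pair stream, then a count of tuples whose two slots are exactly those first occurrences.
import Mathlib
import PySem

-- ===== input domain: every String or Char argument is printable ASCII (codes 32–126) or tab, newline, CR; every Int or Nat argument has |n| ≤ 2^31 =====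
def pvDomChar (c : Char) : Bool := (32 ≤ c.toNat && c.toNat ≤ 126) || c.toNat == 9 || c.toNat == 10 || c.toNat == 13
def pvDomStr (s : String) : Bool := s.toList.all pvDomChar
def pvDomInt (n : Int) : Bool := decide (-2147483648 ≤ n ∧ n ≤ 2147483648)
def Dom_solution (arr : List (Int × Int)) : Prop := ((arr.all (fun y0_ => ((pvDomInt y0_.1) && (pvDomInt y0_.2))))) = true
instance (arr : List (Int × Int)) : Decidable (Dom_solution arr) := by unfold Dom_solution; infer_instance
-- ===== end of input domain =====

-- B replaces A's one-pass mutable seen-set scan by two staged passes: a dict of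
-- first-occurrence indices over the flattened pair stream, then a count of tuples
-- whose two slots are exactly those first occurrences; objective: alternative.

-- ===== PORT A =====
-- per-tuple step of A: inner for-loop over the tuple's two numbers with the both_unseen flag
def pvAstep (st : Int × PySem.Set Int) (tup : Int × Int) : Int × PySem.Set Int :=
  let inner := [tup.1, tup.2].foldl
    (fun (s : Bool × PySem.Set Int) num =>
      if PySem.Set.contains s.2 num then (false, s.2) else (s.1, PySem.Set.add s.2 num))
    (true, st.2)
  (if inner.1 then st.1 + 1 else st.1, inner.2)

def solution (arr : List (Int × Int)) : Int :=
  (arr.foldl pvAstep (0, PySem.Set.empty)).1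

-- ===== PORT B =====
-- first pass of B: first.setdefault(a, 2*i); first.setdefault(b, 2*i+1)
def pvBfirst (arr : List (Int × Int)) : PySem.Dict Int Int :=
  (PySem.List.enumerate arr 0).foldl
    (fun d p => (d.setdefault p.2.1 (2 * p.1)).setdefault p.2.2 (2 * p.1 + 1))
    PySem.Dict.empty

-- second pass of B: count i with first[a] == 2*i and first[b] == 2*i+1
def solution_alt (arr : List (Int × Int)) : Int :=
  let first := pvBfirst arr
  (PySem.List.enumerate arr 0).foldl
    (fun num_groups p =>
      if first.get? p.2.1 = some (2 * p.1) ∧ first.get? p.2.2 = some (2 * p.1 + 1)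
      then num_groups + 1 else num_groups)
    0

-- ===== PRECONDITION & SPEC =====
def Spec_solution (arr : List (Int × Int)) (out : Int) : Prop := out = solution_alt arr
instance (arr : List (Int × Int)) (out : Int) : Decidable (Spec_solution arr out) := by unfold Spec_solution; infer_instance

-- ===== CLAIM (what is proved, stated in full; the proofs are below) =====
def Claim_equal_solution : Prop := ∀ (arr : List (Int × Int)), Dom_solution arr → Spec_solution arr (solution arr)

-- ===== LEMMAS AND PROOFS =====

-- flattened pair stream
def pvFlat (l : List (Int × Int)) : List Int := l.flatMap (fun p => [p.1, p.2])

-- index of first occurrence, starting at offset s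
def pvFirstAux : List Int → Int → Int → Option Int
  | [], _, _ => none
  | y :: t, s, x => if y = x then some s else pvFirstAux t (s + 1) x

-- count of A, with the seen-set threaded explicitly
def pvCnt : PySem.Set Int → List (Int × Int) → Int
  | _, [] => 0
  | S, (a, b) :: t =>
      (if S.contains a = false ∧ (PySem.Set.add S a).contains b = false then 1 else 0)
        + pvCnt (PySem.Set.add (PySem.Set.add S a) b) t

theorem pvAstep_eq (n : Int) (S : PySem.Set Int) (a b : Int) :
    pvAstep (n, S) (a, b) =
      (if S.contains a = false ∧ (PySem.Set.add S a).contains b = false then n + 1 else n,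
       PySem.Set.add (PySem.Set.add S a) b) := by
  by_cases ha : a ∈ S <;> by_cases hb : b ∈ PySem.Set.add S a <;>
    simp [pvAstep, ha, PySem.Set.add_of_mem, PySem.Set.add_eq_ite] <;>
    simp [PySem.Set.mem_add] at hb ⊢ <;> split_ifs <;> simp_all

theorem pvA_foldl (l : List (Int × Int)) (n : Int) (S : PySem.Set Int) :
    (l.foldl pvAstep (n, S)).1 = n + pvCnt S l := by
  induction l generalizing n S with
  | nil => simp [pvCnt]
  | cons hd t ih =>
    obtain ⟨a, b⟩ := hd
    rw [List.foldl_cons, pvAstep_eq, ih, pvCnt]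
    split <;> omega

theorem pvSetdefault_get?_of_contains (d : PySem.Dict Int Int) (k v x : Int)
    (h : d.contains x = true) : (d.setdefault k v).get? x = d.get? x := by
  by_cases hk : x = k
  · subst hk
    rw [PySem.Dict.get?_setdefault_self]
    rw [PySem.Dict.contains_eq_isSome_get?] at h
    cases hg : d.get? x with
    | none => rw [hg] at h; simp at h
    | some w => simp
  · exact PySem.Dict.get?_setdefault_of_ne d v hk

theorem pvBfirst_fold_get (l : List (Int × Int)) (s : Int) (d : PySem.Dict Int Int) (x : Int) :
    ((PySem.List.enumerate l s).foldl
        (fun d p => (d.setdefault p.2.1 (2 * p.1)).setdefault p.2.2 (2 * p.1 + 1)) d).get? x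
      = if d.contains x = true then d.get? x else pvFirstAux (pvFlat l) (2 * s) x := by
  induction l generalizing s d with
  | nil =>
    simp only [PySem.List.enumerate_nil, List.foldl_nil, pvFlat, List.flatMap_nil, pvFirstAux]
    split_ifs with h
    · rfl
    · exact (PySem.Dict.get?_eq_none_iff_contains d x).mpr (by simpa using h)
  | cons hd t ih =>
    obtain ⟨a, b⟩ := hd
    rw [PySem.List.enumerate_cons, List.foldl_cons, ih]
    have hflat : pvFlat ((a, b) :: t) = a :: b :: pvFlat t := by simp [pvFlat]
    rw [hflat]
    set d' := ((d.setdefault a (2 * s)).setdefault b (2 * s + 1)) with hd'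
    have hc' : d'.contains x = (x == b || (x == a || d.contains x)) := by
      rw [hd', PySem.Dict.contains_setdefault, PySem.Dict.contains_setdefault]
    by_cases hdx : d.contains x = true
    · have h1 : (d.setdefault a (2 * s)).contains x = true := by
        rw [PySem.Dict.contains_setdefault]; simp [hdx]
      have : d'.contains x = true := by rw [hc']; simp [hdx]
      rw [if_pos this, if_pos hdx, hd',
        pvSetdefault_get?_of_contains _ _ _ _ h1,
        pvSetdefault_get?_of_contains _ _ _ _ hdx]
    · rw [if_neg hdx]
      by_cases hax : a = x
      · subst hax
        have : d'.contains a = true := by rw [hc']; simp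
        rw [if_pos this]
        have hnone : d.get? a = none := (PySem.Dict.get?_eq_none_iff_contains d a).mpr
          (by simpa using hdx)
        by_cases hba : b = a
        · subst hba
          rw [hd', PySem.Dict.get?_setdefault_self, PySem.Dict.get?_setdefault_self, hnone]
          simp [pvFirstAux]
        · rw [hd', PySem.Dict.get?_setdefault_of_ne _ _ (Ne.symm hba),
            PySem.Dict.get?_setdefault_self, hnone]
          simp [pvFirstAux]
      · by_cases hbx : b = x
        · subst hbx
          have : d'.contains b = true := by rw [hc']; simp
          rw [if_pos this, hd', PySem.Dict.get?_setdefault_self,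
            PySem.Dict.get?_setdefault_of_ne _ _ (fun hh => hax hh.symm)]
          have hnone : d.get? b = none := (PySem.Dict.get?_eq_none_iff_contains d b).mpr
            (by simpa using hdx)
          rw [hnone]
          simp [pvFirstAux, hax]
        · have hc'f : d'.contains x = false := by
            rw [hc']
            simp only [Bool.not_eq_true] at hdx
            simp [hdx, Ne.symm hax, Ne.symm hbx]
          rw [if_neg (by simp [hc'f])]
          simp only [pvFirstAux, if_neg hax, if_neg hbx]
          congr 1
          ring

theorem pvBfirst_get (arr : List (Int × Int)) (x : Int) :
    (pvBfirst arr).get? x = pvFirstAux (pvFlat arr) 0 x := by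
  have := pvBfirst_fold_get arr 0 PySem.Dict.empty x
  simpa [pvBfirst, PySem.Dict.contains_empty] using this

theorem pvFirstAux_not_mem (u v : List Int) (s x : Int) (h : x ∉ u) :
    pvFirstAux (u ++ v) s x = pvFirstAux v (s + (u.length : Int)) x := by
  induction u generalizing s with
  | nil => simp
  | cons y u ih =>
    simp only [List.mem_cons, not_or] at h
    have hyx : ¬ (y = x) := fun hh => h.1 hh.symm
    simp only [List.cons_append, pvFirstAux, if_neg hyx]
    rw [ih _ h.2]
    congr 1
    simp only [List.length_cons]
    push_cast
    ring
theorem pvFirstAux_mem_lt (u v : List Int) (s x : Int) (h : x ∈ u) :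
    ∃ j, pvFirstAux (u ++ v) s x = some j ∧ j < s + (u.length : Int) := by
  induction u generalizing s with
  | nil => simp at h
  | cons y u ih =>
    by_cases hy : y = x
    · refine ⟨s, by simp [pvFirstAux, hy], by simp only [List.length_cons]; push_cast; omega⟩
    · have hx : x ∈ u := by
        rcases List.mem_cons.mp h with h1 | h1
        · exact absurd h1.symm hy
        · exact h1
      obtain ⟨j, hj, hjl⟩ := ih (s + 1) hx
      refine ⟨j, by simp [pvFirstAux, hy, hj], by simp only [List.length_cons] at *; push_cast at hjl ⊢; omega⟩

theorem pvFlat_append (l r : List (Int × Int)) : pvFlat (l ++ r) = pvFlat l ++ pvFlat r := by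
  simp [pvFlat]

theorem pvFlat_length (l : List (Int × Int)) : ((pvFlat l).length : Int) = 2 * l.length := by
  induction l with
  | nil => simp [pvFlat]
  | cons hd t ih => simp [pvFlat] at ih ⊢; omega

theorem pvMain (F : List Int) (t pre : List (Int × Int)) (n : Int)
    (hF : F = pvFlat pre ++ pvFlat t) :
    (PySem.List.enumerate t (pre.length : Int)).foldl
        (fun num_groups p =>
          if pvFirstAux F 0 p.2.1 = some (2 * p.1) ∧ pvFirstAux F 0 p.2.2 = some (2 * p.1 + 1)
          then num_groups + 1 else num_groups) n
      = n + pvCnt (PySem.Set.ofList (pvFlat pre)) t := by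
  induction t generalizing pre n with
  | nil => simp [pvCnt, PySem.List.enumerate_nil]
  | cons hd t ih =>
    obtain ⟨a, b⟩ := hd
    have hflat : pvFlat ((a, b) :: t) = a :: b :: pvFlat t := by simp [pvFlat]
    have hlen : ((pvFlat pre).length : Int) = 2 * (pre.length : Int) := pvFlat_length pre
    rw [hflat] at hF
    have hcond :
        (pvFirstAux F 0 a = some (2 * (pre.length : Int)) ∧
         pvFirstAux F 0 b = some (2 * (pre.length : Int) + 1))
        ↔ ((PySem.Set.ofList (pvFlat pre)).contains a = false ∧
           (PySem.Set.add (PySem.Set.ofList (pvFlat pre)) a).contains b = false) := by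
      by_cases ha : a ∈ pvFlat pre
      · obtain ⟨j, hj, hjl⟩ := pvFirstAux_mem_lt (pvFlat pre) (a :: b :: pvFlat t) 0 a ha
        rw [← hF] at hj
        have : pvFirstAux F 0 a ≠ some (2 * (pre.length : Int)) := by
          rw [hj]; intro hh; rw [Option.some_inj] at hh; omega
        simp [this, ha]
      · have hA : pvFirstAux F 0 a = some (2 * (pre.length : Int)) := by
          rw [hF, pvFirstAux_not_mem _ _ _ _ ha]
          simp [pvFirstAux, hlen]
        have hcA : (PySem.Set.ofList (pvFlat pre)).contains a = false := by
          simp [ha]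
        by_cases hb : b ∈ pvFlat pre
        · obtain ⟨j, hj, hjl⟩ := pvFirstAux_mem_lt (pvFlat pre) (a :: b :: pvFlat t) 0 b hb
          rw [← hF] at hj
          have hB : pvFirstAux F 0 b ≠ some (2 * (pre.length : Int) + 1) := by
            rw [hj]; intro hh; rw [Option.some_inj] at hh; omega
          simp [hB, hb]
        · by_cases hba : b = a
          · have hB : pvFirstAux F 0 b = some (2 * (pre.length : Int)) := by
              rw [hF, pvFirstAux_not_mem _ _ _ _ hb]
              simp [pvFirstAux, hba, hlen]
            have hBne : pvFirstAux F 0 b ≠ some (2 * (pre.length : Int) + 1) := by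
              rw [hB]; intro hh; rw [Option.some_inj] at hh; omega
            simp [PySem.Set.mem_add, hba]
            intro _
            rw [hba] at hBne
            exact hBne
          · have hB : pvFirstAux F 0 b = some (2 * (pre.length : Int) + 1) := by
              rw [hF, pvFirstAux_not_mem _ _ _ _ hb]
              simp [pvFirstAux, Ne.symm hba, hlen]
            simp [hA, hB, ha, hb, hba]
    rw [PySem.List.enumerate_cons, List.foldl_cons]
    have hpre' : F = pvFlat (pre ++ [(a, b)]) ++ pvFlat t := by
      rw [pvFlat_append, hF]
      simp [pvFlat]
    have hlen' : (((pre ++ [(a, b)]).length : Nat) : Int) = (pre.length : Int) + 1 := by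
      simp
    have hofl : PySem.Set.ofList (pvFlat (pre ++ [(a, b)]))
        = PySem.Set.add (PySem.Set.add (PySem.Set.ofList (pvFlat pre)) a) b := by
      have : pvFlat (pre ++ [(a, b)]) = (pvFlat pre ++ [a]) ++ [b] := by
        rw [pvFlat_append]; simp [pvFlat]
      rw [this, PySem.Set.ofList_append_singleton, PySem.Set.ofList_append_singleton]
    have := ih (pre ++ [(a, b)])
      (if pvFirstAux F 0 a = some (2 * (pre.length : Int)) ∧
          pvFirstAux F 0 b = some (2 * (pre.length : Int) + 1)
       then n + 1 else n) hpre'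
    rw [hlen', hofl] at this
    rw [this, pvCnt]
    rw [if_congr hcond rfl rfl]
    split_ifs <;> ring

-- ===== VERDICT (by name: the statement is the Claim_ definition above) =====
theorem solution_spec : Claim_equal_solution := by
  intro arr _
  show solution arr = solution_alt arr
  have hfun : (fun (num_groups : Int) (p : Int × (Int × Int)) =>
        if (pvBfirst arr).get? p.2.1 = some (2 * p.1) ∧
           (pvBfirst arr).get? p.2.2 = some (2 * p.1 + 1)
        then num_groups + 1 else num_groups)
      = (fun (num_groups : Int) (p : Int × (Int × Int)) =>
        if pvFirstAux (pvFlat arr) 0 p.2.1 = some (2 * p.1) ∧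
           pvFirstAux (pvFlat arr) 0 p.2.2 = some (2 * p.1 + 1)
        then num_groups + 1 else num_groups) := by
    funext n p
    rw [pvBfirst_get, pvBfirst_get]
  have hB := pvMain (pvFlat arr) arr [] 0 (by simp [pvFlat])
  simp only [List.length_nil, Nat.cast_zero] at hB
  rw [solution, pvA_foldl, solution_alt]
  rw [hfun, hB]
  rfl
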